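-- pv_equiv track=rewrite | github.com/TheSixthBrigade/radiant-realm-project | whitelisting service/new_obfuscator/transforms/luraph_style.py | _extract_strings
-- ===== SOURCE A (Python) =====
-- from typing import List, Optional, Dict, Tuple, Any
--
-- def _extract_strings(code: str) -> Tuple[str, List[str]]:
--     """Extract string literals and replace with placeholders."""
--     strings = []
--     result = []
--     i = 0
--
--     while i < len(code):
--         if code[i] in '"\'':
--             quote = code[i]
--             start = i
--             i += 1
--             while i < len(code):
--                 if code[i] == '\\' and i + 1 < len(code):
--                     i += 2
--                     continue
--                 if code[i] == quote:
--                     i += 1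
--                     break
--                 i += 1
--             strings.append(code[start:i])
--             result.append(f'\x00S{len(strings)-1}\x00')
--             continue
--         result.append(code[i])
--         i += 1
--
--     return ''.join(result), strings
-- ===== SOURCE B (Python) =====
-- def _extract_strings(code):
--     """Extract string literals and replace with placeholders (state-machine pass)."""
--     strings = []
--     out = []
--     mode = 0          # 0 = outside string, 1 = inside string, 2 = just after backslash
--     quote = ''
--     buf = []
--     for c in code:
--         if mode == 0:
--             if c in '"\'':
--                 mode, quote, buf = 1, c, [c]
--             else:
--                 out.append(c)
--         elif mode == 2:
--             buf.append(c)
--             mode = 1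
--         else:
--             buf.append(c)
--             if c == '\\':
--                 mode = 2
--             elif c == quote:
--                 strings.append(''.join(buf))
--                 out.append(f'\x00S{len(strings)-1}\x00')
--                 mode = 0
--     if mode != 0:   # unterminated literal at end of input
--         strings.append(''.join(buf))
--         out.append(f'\x00S{len(strings)-1}\x00')
--     return ''.join(out), strings
-- ===== Notes on version B (the rewrite author's own statement) =====
-- stated objective: alternative
-- what changed: Replaces A's index-based outer/inner while loops with slicing by a single forward pass driven by a three-state character state machine (outside / inside string / after backslash) that accumulates the current literal in a buffer and flushes an unterminated literal at end of input.
import Mathlib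
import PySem

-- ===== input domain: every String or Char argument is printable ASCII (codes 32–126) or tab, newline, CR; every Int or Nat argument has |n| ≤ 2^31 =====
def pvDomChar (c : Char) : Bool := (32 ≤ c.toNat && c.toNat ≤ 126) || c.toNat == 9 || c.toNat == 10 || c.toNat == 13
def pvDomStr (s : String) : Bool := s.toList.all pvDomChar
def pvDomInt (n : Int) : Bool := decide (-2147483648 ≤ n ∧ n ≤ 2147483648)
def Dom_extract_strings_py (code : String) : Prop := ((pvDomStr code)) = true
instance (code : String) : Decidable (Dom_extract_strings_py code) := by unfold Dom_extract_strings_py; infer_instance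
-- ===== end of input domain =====

-- B replaces A's index-based nested while loops and slicing by a single-pass
-- character state machine (alternative decomposition, same O(n) cost).

-- ===== PORT A =====
-- the placeholder f'\x00S{k}\x00' both Pythons build (k = len(strings)-1 after append)
def pvPlaceholder (n : Nat) : List Char :=
  Char.ofNat 0 :: 'S' :: (toString n).toList ++ [Char.ofNat 0]

-- A's inner while loop: advances i over the string body, returns the final i
def pvInnerA (cs : List Char) (quote : Char) (i : Nat) : Nat :=
  if h : i < cs.length then
    if cs[i] = '\\' ∧ i + 1 < cs.length then pvInnerA cs quote (i + 2)
    else if cs[i] = quote then i + 1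
    else pvInnerA cs quote (i + 1)
  else i
termination_by cs.length - i

theorem pvInnerA_ge (cs : List Char) (q : Char) (i : Nat) : i ≤ pvInnerA cs q i := by
  unfold pvInnerA
  split
  · split
    · have := pvInnerA_ge cs q (i + 2); omega
    · split
      · omega
      · have := pvInnerA_ge cs q (i + 1); omega
  · omega
termination_by cs.length - i

-- A's outer while loop; code[start:i] slice with 0 ≤ start ≤ i is (drop start).take (i-start)
def pvOuterA (cs : List Char) (i : Nat) (strings result : List (List Char)) :
    List (List Char) × List (List Char) :=
  if h : i < cs.length then
    if cs[i] = '"' ∨ cs[i] = '\'' then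
      pvOuterA cs (pvInnerA cs cs[i] (i + 1))
        (strings ++ [(cs.drop i).take (pvInnerA cs cs[i] (i + 1) - i)])
        (result ++ [pvPlaceholder strings.length])
    else
      pvOuterA cs (i + 1) strings (result ++ [[cs[i]]])
  else (strings, result)
termination_by cs.length - i
decreasing_by
  · have := pvInnerA_ge cs cs[i] (i + 1); omega
  · omega

def extract_strings_py (code : String) : String × List String :=
  let p := pvOuterA code.toList 0 [] []
  (String.ofList p.2.flatten, p.1.map String.ofList)

-- ===== PORT B =====
structure PvBSt where
  mode : Nat
  quote : Char
  buf : List Char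
  strings : List (List Char)
  out : List (List Char)
deriving Repr, DecidableEq

-- one step of B's for-loop body
def pvStepB (st : PvBSt) (c : Char) : PvBSt :=
  if st.mode = 0 then
    if c = '"' ∨ c = '\'' then ⟨1, c, [c], st.strings, st.out⟩
    else ⟨st.mode, st.quote, st.buf, st.strings, st.out ++ [[c]]⟩
  else if st.mode = 2 then ⟨1, st.quote, st.buf ++ [c], st.strings, st.out⟩
  else
    let buf' := st.buf ++ [c]
    if c = '\\' then ⟨2, st.quote, buf', st.strings, st.out⟩
    else if c = st.quote then
      ⟨0, st.quote, buf', st.strings ++ [buf'], st.out ++ [pvPlaceholder st.strings.length]⟩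
    else ⟨1, st.quote, buf', st.strings, st.out⟩

-- B's trailing flush of an unterminated literal
def pvFinB (st : PvBSt) : List (List Char) × List (List Char) :=
  if st.mode = 0 then (st.strings, st.out)
  else (st.strings ++ [st.buf], st.out ++ [pvPlaceholder st.strings.length])

-- initial quote is irrelevant in mode 0 (Python uses ''); we use ' '
def extract_strings_py_alt (code : String) : String × List String :=
  let p := pvFinB (code.toList.foldl pvStepB ⟨0, ' ', [], [], []⟩)
  (String.ofList p.2.flatten, p.1.map String.ofList)

-- ===== PRECONDITION & SPEC =====
def Spec_extract_strings_py (code : String) (out : String × List String) : Prop := out = extract_strings_py_alt code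
instance (code : String) (out : String × List String) : Decidable (Spec_extract_strings_py code out) := by unfold Spec_extract_strings_py; infer_instance

-- ===== CLAIM (what is proved, stated in full; the proofs are below) =====
def Claim_equal_extract_strings_py : Prop := ∀ (code : String), Dom_extract_strings_py code → Spec_extract_strings_py code (extract_strings_py code)

-- ===== LEMMAS AND PROOFS =====

theorem pvInnerA_le (cs : List Char) (q : Char) (i : Nat) (hi : i ≤ cs.length) :
    pvInnerA cs q i ≤ cs.length := by
  unfold pvInnerA
  split
  · split
    · exact pvInnerA_le cs q (i + 2) (by omega)
    · split
      · omega
      · exact pvInnerA_le cs q (i + 1) (by omega)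
  · omega
termination_by cs.length - i

-- B, started inside a string at position i, ends as A's inner loop dictates
theorem pvInLemma (cs : List Char) (q : Char) (hq : q ≠ '\\') :
    ∀ i, i ≤ cs.length → ∀ (buf : List Char) (strings out : List (List Char)),
    pvFinB ((cs.drop i).foldl pvStepB ⟨1, q, buf, strings, out⟩)
      = pvFinB ((cs.drop (pvInnerA cs q i)).foldl pvStepB
          ⟨0, q, buf ++ (cs.drop i).take (pvInnerA cs q i - i),
           strings ++ [buf ++ (cs.drop i).take (pvInnerA cs q i - i)],
           out ++ [pvPlaceholder strings.length]⟩) := by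
  intro i hi buf strings out
  rw [pvInnerA]
  split
  · rename_i h
    rw [List.drop_eq_getElem_cons h]
    split
    · -- escape: consume cs[i] = '\' and cs[i+1]
      rename_i hesc
      obtain ⟨hbs, h1⟩ := hesc
      rw [List.drop_eq_getElem_cons h1]
      have hstep : pvStepB ⟨1, q, buf, strings, out⟩ cs[i] = ⟨2, q, buf ++ [cs[i]], strings, out⟩ := by
        simp [pvStepB, hbs]
      have hstep2 : pvStepB ⟨2, q, buf ++ [cs[i]], strings, out⟩ cs[i + 1]
          = ⟨1, q, buf ++ [cs[i], cs[i + 1]], strings, out⟩ := by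
        simp [pvStepB]
      rw [List.foldl_cons, hstep, List.foldl_cons, hstep2]
      have hrec := pvInLemma cs q hq (i + 2) (by omega) (buf ++ [cs[i], cs[i + 1]]) strings out
      rw [hrec]
      have hge := pvInnerA_ge cs q (i + 2)
      obtain ⟨k, hk⟩ : ∃ k, pvInnerA cs q (i + 2) - i = k + 2 := ⟨pvInnerA cs q (i + 2) - i - 2, by omega⟩
      have hk2 : pvInnerA cs q (i + 2) - (i + 2) = k := by omega
      rw [hk, hk2]
      have hseg : List.take (k + 2) (List.drop i cs)
          = cs[i] :: cs[i + 1] :: List.take k (List.drop (i + 2) cs) := by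
        rw [List.drop_eq_getElem_cons h, List.drop_eq_getElem_cons h1]
        show List.take (k + 1 + 1) _ = _
        rw [List.take_succ_cons, List.take_succ_cons]
      simp [hseg]
    · rename_i hnesc
      split
      · -- closing quote: cs[i] = q, inner returns i + 1
        rename_i hcq
        have hnb : ¬ cs[i] = '\\' := by rw [hcq]; exact hq
        have hstep : pvStepB ⟨1, q, buf, strings, out⟩ cs[i]
            = ⟨0, q, buf ++ [cs[i]], strings ++ [buf ++ [cs[i]]],
               out ++ [pvPlaceholder strings.length]⟩ := by
          simp [pvStepB, hcq, hq]
        rw [List.foldl_cons, hstep]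
        have h1 : i + 1 - i = 1 := by omega
        rw [h1]
        have hseg : List.take 1 (List.drop i cs) = [cs[i]] := by
          rw [List.drop_eq_getElem_cons h]
          show List.take (0 + 1) _ = _
          rw [List.take_succ_cons, List.take_zero]
        simp [hseg]
      · -- ordinary char inside string (incl. trailing backslash at end)
        rename_i hnq
        by_cases hbs : cs[i] = '\\'
        · -- then i + 1 = cs.length (else the escape branch would have fired)
          have hlen : ¬ i + 1 < cs.length := fun hlt => hnesc ⟨hbs, hlt⟩
          have hend : cs.drop (i + 1) = [] := List.drop_eq_nil_of_le (by omega)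
          have hstep : pvStepB ⟨1, q, buf, strings, out⟩ cs[i] = ⟨2, q, buf ++ [cs[i]], strings, out⟩ := by
            simp [pvStepB, hbs]
          rw [List.foldl_cons, hstep, hend]
          rw [pvInnerA]
          have : ¬ i + 1 < cs.length := hlen
          rw [dif_neg this, hend]
          have h1 : i + 1 - i = 1 := by omega
          rw [h1]
          rcases Nat.lt_or_ge (i + 1) cs.length with h2 | h2
          · omega
          · simp [pvFinB]
        · have hstep : pvStepB ⟨1, q, buf, strings, out⟩ cs[i] = ⟨1, q, buf ++ [cs[i]], strings, out⟩ := by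
            simp [pvStepB, hbs, hnq]
          rw [List.foldl_cons, hstep]
          have hrec := pvInLemma cs q hq (i + 1) (by omega) (buf ++ [cs[i]]) strings out
          rw [hrec]
          have hge := pvInnerA_ge cs q (i + 1)
          obtain ⟨k, hk⟩ : ∃ k, pvInnerA cs q (i + 1) - i = k + 1 := ⟨pvInnerA cs q (i + 1) - i - 1, by omega⟩
          have hk2 : pvInnerA cs q (i + 1) - (i + 1) = k := by omega
          rw [hk, hk2]
          have hseg : List.take (k + 1) (List.drop i cs)
              = cs[i] :: List.take k (List.drop (i + 1) cs) := by
            rw [List.drop_eq_getElem_cons h, List.take_succ_cons]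
          simp [hseg]
  · -- i = cs.length: unterminated flush on the left equals the pre-flushed state on the right
    rename_i h
    have hend : cs.drop i = [] := List.drop_eq_nil_of_le (by omega)
    rw [hend]
    simp [pvFinB]
termination_by i => cs.length - i
decreasing_by
  · omega
  · omega

-- A's outer loop from position i equals B folded over the remaining characters
theorem pvOutLemma (cs : List Char) :
    ∀ i, i ≤ cs.length → ∀ (strings out : List (List Char)) (q0 : Char) (buf0 : List Char),
    pvOuterA cs i strings out = pvFinB ((cs.drop i).foldl pvStepB ⟨0, q0, buf0, strings, out⟩) := by
  intro i hi strings out q0 buf0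
  rw [pvOuterA]
  split
  · rename_i h
    split
    · rename_i hquote
      have hq : cs[i] ≠ '\\' := by rcases hquote with h' | h' <;> simp [h']
      have hfold : (cs.drop i).foldl pvStepB ⟨0, q0, buf0, strings, out⟩
          = (cs.drop (i + 1)).foldl pvStepB ⟨1, cs[i], [cs[i]], strings, out⟩ := by
        rw [List.drop_eq_getElem_cons h, List.foldl_cons]
        congr 1
        simp [pvStepB, hquote]
      rw [hfold, pvInLemma cs cs[i] hq (i + 1) (by omega) [cs[i]] strings out]
      have hge := pvInnerA_ge cs cs[i] (i + 1)
      have hle := pvInnerA_le cs cs[i] (i + 1) (by omega)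
      set j := pvInnerA cs cs[i] (i + 1) with hj
      obtain ⟨k, hk⟩ : ∃ k, j - i = k + 1 := ⟨j - i - 1, by omega⟩
      have hk2 : j - (i + 1) = k := by omega
      have hseg : (cs.drop i).take (j - i) = cs[i] :: (cs.drop (i + 1)).take (j - (i + 1)) := by
        rw [hk, hk2, List.drop_eq_getElem_cons h, List.take_succ_cons]
      rw [pvOutLemma cs j hle (strings ++ [(cs.drop i).take (j - i)])
            (out ++ [pvPlaceholder strings.length]) cs[i]
            ([cs[i]] ++ (cs.drop (i + 1)).take (j - (i + 1)))]
      simp [hseg]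
    · rename_i hnq
      have hfold : (cs.drop i).foldl pvStepB ⟨0, q0, buf0, strings, out⟩
          = (cs.drop (i + 1)).foldl pvStepB ⟨0, q0, buf0, strings, out ++ [[cs[i]]]⟩ := by
        rw [List.drop_eq_getElem_cons h, List.foldl_cons]
        congr 1
        simp [pvStepB, hnq]
      rw [hfold]
      exact pvOutLemma cs (i + 1) (by omega) strings (out ++ [[cs[i]]]) q0 buf0
  · rename_i h
    have hend : cs.drop i = [] := List.drop_eq_nil_of_le (by omega)
    rw [hend]
    simp [pvFinB]
termination_by i => cs.length - i
decreasing_by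
  · have := pvInnerA_ge cs cs[i] (i + 1); omega
  · omega

-- ===== VERDICT (by name: the statement is the Claim_ definition above) =====
theorem extract_strings_py_spec : Claim_equal_extract_strings_py := by
  intro code _
  unfold Spec_extract_strings_py extract_strings_py extract_strings_py_alt
  rw [pvOutLemma code.toList 0 (by omega) [] [] ' ' []]
  simp
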